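-- pv_equiv track=rewrite | github.com/BaptistePrevost/Competitive-Programming | Codeforces/2132/a.py | dumb
-- ===== SOURCE A (Python) =====
-- def dumb(k):
--     ans=0
--     for i in range(1,100000):
--         for d in str(i):
--             ans+=int(d)
--             k-=1
--             if k==0: break
--         if k==0: break
--     return ans
-- ===== SOURCE B (Python) =====
-- def dumb(k):
--     # Digit sums by dynamic programming (ds[i] = ds[i//10] + i%10) and a tracked
--     # digit length, instead of re-stringifying and walking every digit of every i.
--     ds = [0] * 100000
--     ans = 0
--     n = 1
--     next_pow = 10
--     for i in range(1, 100000):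
--         if i == next_pow:
--             n += 1
--             next_pow *= 10
--         d = ds[i // 10] + i % 10
--         ds[i] = d
--         if 1 <= k <= n:
--             return ans + sum(map(int, str(i)[:k]))
--         ans += d
--         k -= n
--     return ans
-- ===== Notes on version B (the rewrite author's own statement) =====
-- stated objective: faster
-- what changed: Replaces the per-digit simulation (str every i, inner char loop with break) by a dynamic program ds[i] = ds[i//10] + i%10 with a tracked digit length, stringifying only the single number where the k-th digit falls.
import Mathlib
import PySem

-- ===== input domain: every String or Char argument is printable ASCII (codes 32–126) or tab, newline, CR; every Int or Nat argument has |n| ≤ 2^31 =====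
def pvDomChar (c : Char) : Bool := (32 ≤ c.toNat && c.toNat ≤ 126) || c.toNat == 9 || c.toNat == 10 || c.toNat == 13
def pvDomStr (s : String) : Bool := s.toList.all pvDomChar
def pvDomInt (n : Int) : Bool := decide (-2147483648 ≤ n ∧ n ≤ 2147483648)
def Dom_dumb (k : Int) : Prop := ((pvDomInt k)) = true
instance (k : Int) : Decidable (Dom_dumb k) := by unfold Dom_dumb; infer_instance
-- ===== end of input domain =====

-- B replaces A's per-digit simulation (str(i) plus an inner char loop with break for every i)
-- by a digit-sum dynamic program ds[i] = ds[i//10] + i%10 with a tracked digit length,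
-- stringifying only the one number where the k-th digit falls; objective: faster.

-- ===== PORT A =====
-- int(d) where d is one character of str(i); exact: such a character is always a decimal digit
def pvDigit (c : Char) : Int := (PySem.Int.ofStr? (String.ofList [c])).getD 0

-- inner loop 'for d in str(i): ans += int(d); k -= 1; if k == 0: break' (state = (ans, k))
def innerA : List Char → Int → Int → Int × Int
  | [], ans, k => (ans, k)
  | d :: ds, ans, k =>
    let ans := ans + pvDigit d
    let k := k - 1
    if k = 0 then (ans, k) else innerA ds ans k

-- outer loop 'for i in range(1, 100000): ...; if k == 0: break'
def outerA : List Int → Int × Int → Int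
  | [], (ans, _) => ans
  | i :: is, (ans, k) =>
    match innerA (PySem.Int.toStr i).toList ans k with
    | (ans', k') => if k' = 0 then ans' else outerA is (ans', k')

def dumb (k : Int) : Int := outerA (PySem.List.pyRange 1 100000 1) (0, k)

-- ===== PORT B =====
-- sum(map(int, s))
def dsumB (cs : List Char) : Int := cs.foldl (fun a c => a + pvDigit c) 0

-- the loop of Source B; state = (ds, ans, k, n, next_pow)
-- the Python list ds is modelled by Array Int (O(1) read/write, like a Python list);
-- ds[i // 10] and ds[i] = d are exact: every executed index satisfies 0 <= index < len(ds)
def loopB : List Int → Array Int → Int → Int → Int → Int → Int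
  | [], _, ans, _, _, _ => ans
  | i :: is, ds, ans, k, n, np =>
    let p := if i = np then (n + 1, np * 10) else (n, np)
    let d := ds.getD (PySem.Int.floordiv i 10).toNat 0 + PySem.Int.mod i 10
    let ds' := ds.setIfInBounds i.toNat d
    if 1 ≤ k ∧ k ≤ p.1 then
      ans + dsumB (PySem.Str.slice (PySem.Int.toStr i) none (some k)).toList
    else loopB is ds' (ans + d) (k - p.1) p.1 p.2

def dumb_alt (k : Int) : Int :=
  loopB (PySem.List.pyRange 1 100000 1) (Array.replicate 100000 0) 0 k 1 10

-- ===== PRECONDITION & SPEC =====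
def Spec_dumb (k : Int) (out : Int) : Prop := out = dumb_alt k
instance (k : Int) (out : Int) : Decidable (Spec_dumb k out) := by unfold Spec_dumb; infer_instance

-- ===== CLAIM (what is proved, stated in full; the proofs are below) =====
def Claim_equal_dumb : Prop := ∀ (k : Int), Dom_dumb k → Spec_dumb k (dumb k)

-- ===== LEMMAS AND PROOFS =====

theorem dsumB_shift (cs : List Char) (a : Int) :
    cs.foldl (fun x c => x + pvDigit c) a = a + dsumB cs := by
  unfold dsumB; rw [PySem.List.foldl_add, PySem.List.foldl_add]; ring

theorem dsumB_cons (c : Char) (cs : List Char) : dsumB (c :: cs) = pvDigit c + dsumB cs := by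
  show (c :: cs).foldl (fun x c => x + pvDigit c) 0 = _
  rw [List.foldl_cons, dsumB_shift]; ring

theorem dsumB_append_singleton (cs : List Char) (c : Char) :
    dsumB (cs ++ [c]) = dsumB cs + pvDigit c := by
  show (cs ++ [c]).foldl (fun x c => x + pvDigit c) 0 = _
  rw [List.foldl_append, List.foldl_cons, List.foldl_nil]; rfl

theorem toDigitsCore_acc (f : Nat) : ∀ (n : Nat) (acc : List Char),
    Nat.toDigitsCore 10 f n acc = Nat.toDigitsCore 10 f n [] ++ acc := by
  induction f with
  | zero => intro n acc; simp [Nat.toDigitsCore]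
  | succ f ih =>
    intro n acc
    simp only [Nat.toDigitsCore]
    by_cases h : n / 10 = 0
    · simp [h]
    · simp only [h, if_false]
      rw [ih (n / 10) [Nat.digitChar (n % 10)], ih (n / 10) (Nat.digitChar (n % 10) :: acc)]
      simp

theorem toDigitsCore_fuel (f₁ : Nat) : ∀ (f₂ n : Nat), 1 ≤ f₁ → 1 ≤ f₂ → n < 10 ^ f₁ → n < 10 ^ f₂ →
    Nat.toDigitsCore 10 f₁ n [] = Nat.toDigitsCore 10 f₂ n [] := by
  induction f₁ with
  | zero => omega
  | succ f ih =>
    intro f₂ n _ h2 hn1 hn2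
    obtain ⟨f₂', rfl⟩ : ∃ m, f₂ = m + 1 := ⟨f₂ - 1, by omega⟩
    simp only [Nat.toDigitsCore]
    by_cases h : n / 10 = 0
    · simp [h]
    · simp only [h, if_false]
      rw [toDigitsCore_acc, toDigitsCore_acc f₂']
      have hd1 : n / 10 < 10 ^ f := by
        apply Nat.div_lt_of_lt_mul
        have : 10 * 10 ^ f = 10 ^ (f + 1) := by ring
        omega
      have hd2 : n / 10 < 10 ^ f₂' := by
        apply Nat.div_lt_of_lt_mul
        have : 10 * 10 ^ f₂' = 10 ^ (f₂' + 1) := by ring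
        omega
      have hf : 1 ≤ f := by
        rcases Nat.eq_zero_or_pos f with hf0 | hf0
        · subst hf0; simp at hd1; omega
        · exact hf0
      have hf2 : 1 ≤ f₂' := by
        rcases Nat.eq_zero_or_pos f₂' with hf0 | hf0
        · subst hf0; simp at hd2; omega
        · exact hf0
      rw [ih f₂' (n / 10) hf hf2 hd1 hd2]

theorem toDigits_lt_ten (m : Nat) (h : m < 10) : Nat.toDigits 10 m = [Nat.digitChar m] := by
  simp [Nat.toDigits, Nat.toDigitsCore, Nat.div_eq_of_lt h, Nat.mod_eq_of_lt h]

theorem toDigitsCore_step (f n : Nat) (h10 : 10 ≤ n) :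
    Nat.toDigitsCore 10 (f + 1) n [] =
      Nat.toDigitsCore 10 f (n / 10) [] ++ [Nat.digitChar (n % 10)] := by
  conv_lhs => simp only [Nat.toDigitsCore]
  have h0 : n / 10 ≠ 0 := by omega
  simp only [h0, if_false]
  rw [toDigitsCore_acc]

theorem toDigits_ge_ten (m : Nat) (h : 10 ≤ m) :
    Nat.toDigits 10 m = Nat.toDigits 10 (m / 10) ++ [Nat.digitChar (m % 10)] := by
  show Nat.toDigitsCore 10 (m + 1) m [] = Nat.toDigitsCore 10 (m / 10 + 1) (m / 10) [] ++ _
  rw [toDigitsCore_step m m h]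
  congr 1
  apply toDigitsCore_fuel
  · omega
  · omega
  · calc m / 10 < m := Nat.div_lt_self (by omega) (by norm_num)
      _ < 10 ^ m := Nat.lt_pow_self (by norm_num)
  · calc m / 10 < 10 ^ (m / 10) := Nat.lt_pow_self (by norm_num)
      _ ≤ 10 ^ (m / 10 + 1) := Nat.pow_le_pow_right (by norm_num) (by omega)

def natDS (m : Nat) : Int := dsumB (Nat.toDigits 10 m)

theorem pvDigit_digitChar (d : Nat) (hd : d < 10) : pvDigit (Nat.digitChar d) = (d : Int) := by
  interval_cases d <;> decide

theorem natDS_zero : natDS 0 = 0 := by decide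

theorem natDS_rec (m : Nat) (_h : 1 ≤ m) : natDS m = natDS (m / 10) + ((m % 10 : Nat) : Int) := by
  by_cases h10 : m < 10
  · have hd : m / 10 = 0 := Nat.div_eq_of_lt h10
    have hm : m % 10 = m := Nat.mod_eq_of_lt h10
    rw [hd, hm, natDS_zero]
    unfold natDS
    rw [toDigits_lt_ten m h10, dsumB_cons]
    show pvDigit (Nat.digitChar m) + dsumB [] = 0 + m
    rw [pvDigit_digitChar m h10]
    show (m : Int) + 0 = 0 + m; ring
  · rw [Nat.not_lt] at h10
    unfold natDS
    rw [toDigits_ge_ten m h10, dsumB_append_singleton, pvDigit_digitChar _ (Nat.mod_lt m (by norm_num))]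

theorem toDigits_length_eq (e : Nat) : ∀ (m : Nat), 10 ^ e ≤ m → m < 10 ^ (e + 1) →
    (Nat.toDigits 10 m).length = e + 1 := by
  induction e with
  | zero =>
    intro m h1 h2
    rw [pow_zero] at h1
    rw [pow_one] at h2
    rw [toDigits_lt_ten m h2]; rfl
  | succ e ih =>
    intro m h1 h2
    have h10 : 10 ≤ m := le_trans (by calc (10:Nat) = 10 ^ 1 := (pow_one 10).symm
                                         _ ≤ 10 ^ (e+1) := Nat.pow_le_pow_right (by norm_num) (by omega)) h1
    rw [toDigits_ge_ten m h10, List.length_append]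
    have hl : 10 ^ e ≤ m / 10 := by
      rw [Nat.le_div_iff_mul_le (by norm_num)]
      calc 10 ^ e * 10 = 10 ^ (e + 1) := by ring
        _ ≤ m := h1
    have hr : m / 10 < 10 ^ (e + 1) := by
      apply Nat.div_lt_of_lt_mul
      have : 10 * 10 ^ (e + 1) = 10 ^ (e + 2) := by ring
      omega
    rw [ih (m / 10) hl hr]; rfl

theorem innerA_eq (cs : List Char) : ∀ (ans k : Int),
    innerA cs ans k =
      if 1 ≤ k ∧ k ≤ (cs.length : Int) then (ans + dsumB (cs.take k.toNat), 0)
      else (ans + dsumB cs, k - (cs.length : Int)) := by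
  induction cs with
  | nil =>
    intro ans k
    have h0 : ¬ (1 ≤ k ∧ k ≤ (([] : List Char).length : Int)) := by simp; omega
    rw [if_neg h0]
    simp [innerA, dsumB]
  | cons c cs ih =>
    intro ans k
    simp only [innerA]
    by_cases hk1 : k - 1 = 0
    · have hk : k = 1 := by omega
      have hc : 1 ≤ k ∧ k ≤ ((c :: cs).length : Int) := by
        refine ⟨by omega, ?_⟩
        rw [hk, List.length_cons]; push_cast; omega
      rw [if_pos hk1, if_pos hc]
      have : k.toNat = 1 := by omega
      rw [this]
      simp only [List.take_succ_cons, List.take_zero, dsumB_cons]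
      rw [Prod.mk.injEq]
      constructor
      · show ans + pvDigit c = ans + (pvDigit c + dsumB [])
        simp [dsumB]
      · omega
    · rw [if_neg hk1, ih]
      by_cases hc : 1 ≤ k - 1 ∧ k - 1 ≤ (cs.length : Int)
      · have hc' : 1 ≤ k ∧ k ≤ ((c :: cs).length : Int) := by
          simp only [List.length_cons] at *; push_cast at *; omega
        rw [if_pos hc, if_pos hc']
        have hkt : k.toNat = (k - 1).toNat + 1 := by omega
        rw [hkt]
        simp only [List.take_succ_cons]
        rw [dsumB_cons]
        rw [Prod.mk.injEq]
        constructor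
        · ring
        · rfl
      · have hc' : ¬ (1 ≤ k ∧ k ≤ ((c :: cs).length : Int)) := by
          simp only [List.length_cons] at *; push_cast at *; omega
        rw [if_neg hc, if_neg hc']
        rw [dsumB_cons]
        rw [Prod.mk.injEq]
        constructor
        · ring
        · simp only [List.length_cons]; push_cast; ring

theorem toChars_of_pos (i : Int) (h : 0 < i) :
    (PySem.Int.toStr i).toList = Nat.toDigits 10 i.toNat := by
  rw [PySem.Int.toList_toStr]
  simp [PySem.Int.toChars, not_lt.mpr h.le]

theorem main_loop (fuel : Nat) : ∀ (i ans k n np : Int) (ds : Array Int),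
    (100000 - i).toNat ≤ fuel →
    1 ≤ i → i ≤ 100000 →
    1 ≤ n → np = (10 : Int) ^ n.toNat →
    (10 : Int) ^ (n.toNat - 1) ≤ i → i ≤ np →
    ds.size = 100000 →
    (∀ j : Nat, (j : Int) < i → ds.getD j 0 = natDS j) →
    outerA (PySem.List.pyRange i 100000 1) (ans, k) =
      loopB (PySem.List.pyRange i 100000 1) ds ans k n np := by
  induction fuel with
  | zero =>
    intro i ans k n np ds hf hi1 hi2 _ _ _ _ _ _
    have hend : i = 100000 := by omega
    subst hend
    rw [PySem.List.pyRange_one_eq_nil (by omega)]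
    rfl
  | succ fuel ih =>
    intro i ans k n np ds hf hi1 hi2 hn1 hnp hlo hhi hlen hds
    by_cases hend : i = 100000
    · subst hend; rw [PySem.List.pyRange_one_eq_nil (by omega)]; rfl
    have hilt : i < 100000 := by omega
    rw [PySem.List.pyRange_one_cons (by omega)]
    simp only [outerA, loopB]
    set P : Int × Int := if i = np then (n + 1, np * 10) else (n, np) with hP
    obtain ⟨hP1, hP2, hPlo, hPhi⟩ :
        1 ≤ P.1 ∧ P.2 = (10 : Int) ^ P.1.toNat ∧ (10 : Int) ^ (P.1.toNat - 1) ≤ i ∧ i < P.2 := by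
      by_cases hup : i = np
      · rw [hP, if_pos hup]
        have hnp0 : 0 < np := by rw [hnp]; positivity
        have ht : (n + 1).toNat = n.toNat + 1 := by omega
        refine ⟨by omega, ?_, ?_, ?_⟩
        · show np * 10 = (10 : Int) ^ (n + 1).toNat
          rw [ht, pow_succ, ← hnp]
        · show (10 : Int) ^ ((n + 1).toNat - 1) ≤ i
          have : (n + 1).toNat - 1 = n.toNat := by omega
          rw [this, ← hnp, hup]
        · show i < np * 10
          omega
      · rw [hP, if_neg hup]
        exact ⟨hn1, hnp, hlo, by omega⟩
    have hcs : (PySem.Int.toStr i).toList = Nat.toDigits 10 i.toNat :=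
      toChars_of_pos i (by omega)
    have hlencs : (Nat.toDigits 10 i.toNat).length = P.1.toNat := by
      have he : P.1.toNat = (P.1.toNat - 1) + 1 := by omega
      have hA : ((10 ^ (P.1.toNat - 1) : Nat) : Int) = (10 : Int) ^ (P.1.toNat - 1) := by
        push_cast; ring
      have hB : ((10 ^ P.1.toNat : Nat) : Int) = (10 : Int) ^ P.1.toNat := by
        push_cast; ring
      have h1 : 10 ^ (P.1.toNat - 1) ≤ i.toNat := by
        have h := hPlo; rw [← hA] at h; omega
      have h2 : i.toNat < 10 ^ ((P.1.toNat - 1) + 1) := by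
        rw [← he]
        have h := hPhi; rw [hP2, ← hB] at h; omega
      rw [toDigits_length_eq (P.1.toNat - 1) i.toNat h1 h2, ← he]
    have hlenInt : ((Nat.toDigits 10 i.toNat).length : Int) = P.1 := by
      rw [hlencs]; omega
    rw [hcs, innerA_eq]
    by_cases hC : 1 ≤ k ∧ k ≤ P.1
    · have hC' : 1 ≤ k ∧ k ≤ ((Nat.toDigits 10 i.toNat).length : Int) := by
        rw [hlenInt]; exact hC
      rw [if_pos hC', if_pos hC]
      show (if (0 : Int) = 0 then ans + dsumB (List.take k.toNat (Nat.toDigits 10 i.toNat))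
            else outerA (PySem.List.pyRange (i+1) 100000 1)
              (ans + dsumB (List.take k.toNat (Nat.toDigits 10 i.toNat)), 0)) = _
      rw [if_pos rfl]
      congr 1
      have hsl : (PySem.Str.slice (PySem.Int.toStr i) none (some k)).toList
          = List.take k.toNat ((PySem.Int.toStr i).toList) := by
        simp [pysem, PySem.List.slice_to _ (by omega : (0 : Int) ≤ k)]
      rw [hsl, hcs]
    · have hC' : ¬ (1 ≤ k ∧ k ≤ ((Nat.toDigits 10 i.toNat).length : Int)) := by
        rw [hlenInt]; exact hC
      rw [if_neg hC', if_neg hC]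
      have hk' : ¬ (k - ((Nat.toDigits 10 i.toNat).length : Int) = 0) := by
        rw [hlenInt]; omega
      show (if k - ((Nat.toDigits 10 i.toNat).length : Int) = 0
            then ans + dsumB (Nat.toDigits 10 i.toNat)
            else outerA (PySem.List.pyRange (i+1) 100000 1)
              (ans + dsumB (Nat.toDigits 10 i.toNat),
               k - ((Nat.toDigits 10 i.toNat).length : Int))) = _
      rw [if_neg hk']
      have hiInt : ((i.toNat : Nat) : Int) = i := Int.toNat_of_nonneg (by omega)
      have hfd : PySem.Int.floordiv i 10 = ((i.toNat / 10 : Nat) : Int) := by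
        conv_lhs => rw [← hiInt]
        exact_mod_cast PySem.Int.floordiv_natCast i.toNat 10
      have hmd : PySem.Int.mod i 10 = ((i.toNat % 10 : Nat) : Int) := by
        conv_lhs => rw [← hiInt]
        exact_mod_cast PySem.Int.mod_natCast i.toNat 10
      have hd : ds.getD (PySem.Int.floordiv i 10).toNat 0 + PySem.Int.mod i 10
          = natDS i.toNat := by
        rw [hfd, hmd, Int.toNat_natCast]
        rw [hds (i.toNat / 10) (by omega)]
        rw [← natDS_rec i.toNat (by omega)]
      rw [hd]
      have hdsum : dsumB (Nat.toDigits 10 i.toNat) = natDS i.toNat := rfl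
      rw [hdsum, hlenInt]
      refine ih (i + 1) (ans + natDS i.toNat) (k - P.1) P.1 P.2
        (ds.setIfInBounds i.toNat (natDS i.toNat)) ?_ (by omega) (by omega) hP1 hP2 ?_ (by omega) ?_ ?_
      · omega
      · omega
      · rw [Array.size_setIfInBounds]; exact hlen
      · intro j hj
        have hjsz : j < ds.size := by omega
        by_cases hji : j = i.toNat
        · subst hji
          rw [Array.getD_eq_getD_getElem?, Array.getElem?_setIfInBounds_self,
            if_pos (by omega : i.toNat < ds.size), Option.getD_some]
        · rw [Array.getD_eq_getD_getElem?, Array.getElem?_setIfInBounds_ne (by omega),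
            ← Array.getD_eq_getD_getElem?]
          exact hds j (by omega)

-- ===== VERDICT (by name: the statement is the Claim_ definition above) =====
theorem dumb_spec : Claim_equal_dumb := by
  intro k _
  unfold Spec_dumb dumb dumb_alt
  refine main_loop 100000 1 0 k 1 10 (Array.replicate 100000 0) ?_ (by omega) (by omega)
    (by omega) (by norm_num) (by norm_num) (by omega) Array.size_replicate ?_
  · omega
  · intro j hj
    have hj0 : j = 0 := by omega
    subst hj0
    rw [Array.getD_eq_getD_getElem?, Array.getElem?_replicate, if_pos (by omega : (0:Nat) < 100000),
      Option.getD_some, natDS_zero]
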